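-- pv_equiv track=rewrite | github.com/greydoubt/COMPLEXITY_LAND | 11_exptime_haunted_factory.py | solve_haunted_factory
-- ===== SOURCE A (Python) =====
-- def solve_haunted_factory(ouranian_coal, desired_sequences):
--     num_coal_lumps = len(ouranian_coal)
--     num_sequences = len(desired_sequences)
--
--     # Initialize the dynamic programming table
--     dp = [[False] * (num_coal_lumps + 1) for _ in range(num_sequences + 1)]
--
--     # Base case: An empty sequence can be generated using no coal lumps
--     dp[0][0] = True
--
--     # Dynamic programming iteration
--     for sequence_index in range(1, num_sequences + 1):
--         for coal_lump_index in range(1, num_coal_lumps + 1):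
--             # Check if the current coal lump can be used to generate the current sequence
--             if dp[sequence_index - 1][coal_lump_index - 1] and ouranian_coal[coal_lump_index - 1] == desired_sequences[sequence_index - 1]:
--                 dp[sequence_index][coal_lump_index] = True
--             else:
--                 # Check if previous coal lumps can generate the current sequence
--                 for prev_coal_lump_index in range(1, coal_lump_index):
--                     if dp[sequence_index][prev_coal_lump_index] and ouranian_coal[coal_lump_index - 1] == desired_sequences[sequence_index - 1]:
--                         dp[sequence_index][coal_lump_index] = True
--                         break
--
--     # Check if the desired spectral sequences can be generated using the coal lumps
--     if any(dp[num_sequences]):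
--         return "It is possible to generate the desired spectral sequences."
--     else:
--         return "It is not possible to generate the desired spectral sequences."
-- ===== SOURCE B (Python) =====
-- def solve_haunted_factory(ouranian_coal, desired_sequences):
--     n = len(ouranian_coal)
--     # single rolling row + a running "row already has a True" flag,
--     # replacing A's 2D table and its inner prev-scan
--     row = [True] + [False] * n
--     for target in desired_sequences:
--         new_row = [False] * (n + 1)
--         flag = False
--         for i, lump in enumerate(ouranian_coal):
--             val = lump == target and (row[i] or flag)
--             new_row[i + 1] = val
--             flag = flag or val
--         row = new_row
--     if any(row):
--         return "It is possible to generate the desired spectral sequences."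
--     else:
--         return "It is not possible to generate the desired spectral sequences."
-- ===== Notes on version B (the rewrite author's own statement) =====
-- stated objective: faster
-- what changed: Replaced the (S+1)x(C+1) DP table and its O(C) inner scan over previous columns by a single rolling row plus a running 'row already has a True' flag, turning the inner scan into O(1).
import Mathlib
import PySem

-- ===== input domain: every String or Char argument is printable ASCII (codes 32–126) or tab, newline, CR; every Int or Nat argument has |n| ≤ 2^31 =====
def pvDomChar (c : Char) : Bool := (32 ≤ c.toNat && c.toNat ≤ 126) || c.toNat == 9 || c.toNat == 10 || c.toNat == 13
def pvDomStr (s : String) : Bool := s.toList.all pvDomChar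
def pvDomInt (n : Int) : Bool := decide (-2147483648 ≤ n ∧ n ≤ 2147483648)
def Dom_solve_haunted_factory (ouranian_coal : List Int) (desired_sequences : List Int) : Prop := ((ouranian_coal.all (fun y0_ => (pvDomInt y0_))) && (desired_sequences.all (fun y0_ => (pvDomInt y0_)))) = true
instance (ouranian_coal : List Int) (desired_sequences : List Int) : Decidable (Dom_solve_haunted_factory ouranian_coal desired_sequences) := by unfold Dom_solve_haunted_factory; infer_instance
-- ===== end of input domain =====

-- B replaces A's 2D DP table and its O(C) inner prev-scan by a single rolling row plus a
-- running "row already has a True" flag (objective: faster, O(S*C) instead of O(S*C^2)).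

-- ===== PORT A =====
-- inner two loops of A: for coal_lump_index in range(1, num_coal_lumps+1) with the prev-scan
def pvA_inner (coal seq : List Int) (s : Nat) (dp : List (List Bool)) : List (List Bool) :=
  (List.range coal.length).foldl (fun dp c0 =>
    let c := c0 + 1
    if (dp.getD (s-1) []).getD (c-1) false && (coal.getD (c-1) 0 == seq.getD (s-1) 0) then
      dp.set s ((dp.getD s []).set c true)
    else
      -- for prev_coal_lump_index in range(1, coal_lump_index): … break  ≡ existence over that range
      if (List.range (c-1)).any (fun p0 =>
            (dp.getD s []).getD (p0+1) false && (coal.getD (c-1) 0 == seq.getD (s-1) 0)) then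
        dp.set s ((dp.getD s []).set c true)
      else dp) dp

def solve_haunted_factory (ouranian_coal : List Int) (desired_sequences : List Int) : String :=
  let num_coal_lumps := ouranian_coal.length
  let num_sequences := desired_sequences.length
  let dp : List (List Bool) := List.replicate (num_sequences+1) (List.replicate (num_coal_lumps+1) false)
  let dp := dp.set 0 ((dp.getD 0 []).set 0 true)
  let dp := (List.range num_sequences).foldl
      (fun dp s0 => pvA_inner ouranian_coal desired_sequences (s0+1) dp) dp
  if (dp.getD num_sequences []).any id then
    "It is possible to generate the desired spectral sequences."
  else
    "It is not possible to generate the desired spectral sequences."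

-- ===== PORT B =====
-- inner loop of B: walk coal and the previous row in lockstep, carrying the running flag
def pvBRow (e : Int) : List Int → List Bool → Bool → List Bool
  | [], _, _ => []
  | l :: ls, prev, flag =>
    let val := (l == e) && (prev.headD false || flag)
    val :: pvBRow e ls prev.tail (flag || val)

def solve_haunted_factory_alt (ouranian_coal : List Int) (desired_sequences : List Int) : String :=
  let row0 : List Bool := true :: List.replicate ouranian_coal.length false
  let rowN := desired_sequences.foldl (fun row e => false :: pvBRow e ouranian_coal row false) row0
  if rowN.any id then
    "It is possible to generate the desired spectral sequences."
  else
    "It is not possible to generate the desired spectral sequences."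

-- ===== PRECONDITION & SPEC =====
def Spec_solve_haunted_factory (ouranian_coal : List Int) (desired_sequences : List Int) (out : String) : Prop := out = solve_haunted_factory_alt ouranian_coal desired_sequences
instance (ouranian_coal : List Int) (desired_sequences : List Int) (out : String) : Decidable (Spec_solve_haunted_factory ouranian_coal desired_sequences out) := by unfold Spec_solve_haunted_factory; infer_instance

-- ===== CLAIM (what is proved, stated in full; the proofs are below) =====
def Claim_equal_solve_haunted_factory : Prop := ∀ (ouranian_coal : List Int) (desired_sequences : List Int), Dom_solve_haunted_factory ouranian_coal desired_sequences → Spec_solve_haunted_factory ouranian_coal desired_sequences (solve_haunted_factory ouranian_coal desired_sequences)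

-- ===== LEMMAS AND PROOFS =====

-- B's row k (the rolling row after the first k sequence elements)
def pvRowsB (coal seq : List Int) (k : Nat) : List Bool :=
  (seq.take k).foldl (fun row e => false :: pvBRow e coal row false)
    (true :: List.replicate coal.length false)

-- the table A has built after its first k outer iterations
def pvTbl (coal seq : List Int) : Nat → List (List Bool)
  | 0 => (List.replicate (seq.length+1) (List.replicate (coal.length+1) false)).set 0
           ((List.replicate (coal.length+1) false).set 0 true)
  | k+1 => (pvTbl coal seq k).set (k+1)
             (false :: pvBRow (seq.getD k 0) coal (pvRowsB coal seq k) false)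

theorem pvBRow_length (e : Int) (coal : List Int) : ∀ (prev : List Bool) (flag : Bool),
    (pvBRow e coal prev flag).length = coal.length := by
  induction coal with
  | nil => intro prev flag; rfl
  | cons l ls ih => intro prev flag; simp [pvBRow, ih]

theorem pvBRow_take_succ (e : Int) : ∀ (coal : List Int) (prev : List Bool) (flag : Bool)
    (j : Nat), j < coal.length →
    (pvBRow e coal prev flag).take (j+1) =
      (pvBRow e coal prev flag).take j ++
        [(coal.getD j 0 == e) &&
          (prev.getD j false || (flag || ((pvBRow e coal prev flag).take j).any id))] := by
  intro coal
  induction coal with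
  | nil => intro prev flag j hj; simp at hj
  | cons l ls ih =>
    intro prev flag j hj
    cases j with
    | zero =>
      cases prev <;> simp [pvBRow]
    | succ j =>
      have hj' : j < ls.length := by simpa using hj
      have := ih prev.tail (flag || ((l == e) && (prev.headD false || flag))) j hj'
      have hgd : prev.getD (j+1) false = prev.tail.getD j false := by
        cases prev <;> simp
      simp only [pvBRow, List.take_succ_cons, List.getD_cons_succ, this, hgd,
        List.any_cons, id, List.cons_append, Bool.or_assoc]

theorem pv_any_range_getD (l : List Bool) : ∀ (j : Nat), j ≤ l.length →
    (List.range j).any (fun p => l.getD p false) = (l.take j).any id := by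
  intro j
  induction j with
  | zero => intro _; simp
  | succ j ih =>
    intro hj
    have hj' : j ≤ l.length := Nat.le_of_succ_le hj
    have hjlt : j < l.length := hj
    rw [List.range_succ]
    simp only [List.any_append, List.any_cons, List.any_nil, Bool.or_false]
    rw [ih hj', List.take_succ, List.getElem?_eq_getElem hjlt]
    simp only [Option.toList_some, List.any_append, List.any_cons, List.any_nil,
      Bool.or_false, id]
    rw [List.getD_eq_getElem l false hjlt]

theorem pv_and_any (m : Bool) (f : Nat → Bool) (l : List Nat) :
    l.any (fun p => f p && m) = (l.any f && m) := by
  cases m <;> simp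

theorem pv_set_getD_self {α : Type} (l : List α) (i : Nat) (d : α) (h : i < l.length) :
    l.set i (l.getD i d) = l := by
  rw [List.getD_eq_getElem l d h]; exact List.set_getElem_self ..

theorem pv_getD_set_ne {α : Type} (l : List α) (i j : Nat) (v d : α) (h : i ≠ j) :
    (l.set i v).getD j d = l.getD j d := by
  simp [List.getD, List.getElem?_set_ne h]

theorem pv_getD_set_self {α : Type} (l : List α) (i : Nat) (v d : α) (h : i < l.length) :
    (l.set i v).getD i d = v := by
  simp [List.getD, h]

theorem pv_set_mid {α : Type} (X Y : List α) (b v : α) :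
    ((X ++ b :: Y).set X.length v) = X ++ v :: Y := by
  induction X with
  | nil => rfl
  | cons x xs ih => simp [ih]

-- A's inner double loop fills row s with exactly B's row transformation
theorem pv_inner_spec (coal seq : List Int) (s : Nat) (dp : List (List Bool))
    (hs1 : 1 ≤ s) (hlen : s < dp.length)
    (hrow : dp.getD s [] = List.replicate (coal.length+1) false) :
    pvA_inner coal seq s dp =
      dp.set s (false :: pvBRow (seq.getD (s-1) 0) coal (dp.getD (s-1) []) false) := by
  set e := seq.getD (s-1) 0 with he
  set prev := dp.getD (s-1) [] with hprev
  set full := pvBRow e coal prev false with hfull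
  have hfl : full.length = coal.length := pvBRow_length e coal prev false
  have key : ∀ j, j ≤ coal.length →
      (List.range j).foldl (fun dp c0 =>
        let c := c0 + 1
        if (dp.getD (s-1) []).getD (c-1) false && (coal.getD (c-1) 0 == seq.getD (s-1) 0) then
          dp.set s ((dp.getD s []).set c true)
        else
          if (List.range (c-1)).any (fun p0 =>
                (dp.getD s []).getD (p0+1) false && (coal.getD (c-1) 0 == seq.getD (s-1) 0)) then
            dp.set s ((dp.getD s []).set c true)
          else dp) dp
      = dp.set s (false :: (full.take j ++ List.replicate (coal.length - j) false)) := by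
    intro j
    induction j with
    | zero =>
      intro _
      simp only [List.range_zero, List.foldl_nil, List.take_zero, Nat.sub_zero, List.nil_append]
      rw [← List.replicate_succ, ← hrow]
      exact (pv_set_getD_self dp s [] hlen).symm
    | succ j ih =>
      intro hj
      have hjc : j < coal.length := hj
      have hjf : j < full.length := by omega
      rw [List.range_succ, List.foldl_append, ih (Nat.le_of_lt hjc)]
      simp only [List.foldl_cons, List.foldl_nil, Nat.add_sub_cancel]
      have hsne : s - 1 ≠ s := by omega
      have hcur : ∀ (r : List Bool), ((dp.set s r).getD s []) = r := fun r =>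
        pv_getD_set_self dp s r [] hlen
      have hprev' : ((dp.set s (false :: (full.take j ++ List.replicate (coal.length - j) false))).getD (s-1) []) = prev :=
        pv_getD_set_ne dp s (s-1) _ [] hsne.symm
      rw [hcur, hprev']
      -- the partially-built current row
      have hpadpos : coal.length - j = (coal.length - (j+1)) + 1 := by omega
      have hpad : List.replicate (coal.length - j) (false : Bool)
          = false :: List.replicate (coal.length - (j+1)) false := by
        rw [hpadpos, List.replicate_succ]
      set pad := List.replicate (coal.length - (j+1)) (false : Bool) with hpaddef
      have hcurrow : (full.take j ++ List.replicate (coal.length - j) false)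
          = full.take j ++ false :: pad := by rw [hpad]
      -- the scanned prefix of the current row
      have htlen : (full.take j).length = j := by simp [hfl]; omega
      have hscan : (List.range j).any (fun p0 =>
            ((false :: (full.take j ++ List.replicate (coal.length - j) false)).getD (p0+1) false)
              && (coal.getD j 0 == e))
          = ((full.take j).any id && (coal.getD j 0 == e)) := by
        rw [pv_and_any]
        congr 1
        have : ∀ p0, ((false :: (full.take j ++ List.replicate (coal.length - j) false)).getD (p0+1) false)
            = (full.take j ++ List.replicate (coal.length - j) false).getD p0 false := by
          intro p0; rfl
        simp only [this]
        have hlen2 : j ≤ (full.take j ++ List.replicate (coal.length - j) false).length := by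
          simp [htlen]
        rw [pv_any_range_getD _ j hlen2, List.take_append_of_le_length (by simp [htlen])]
        rw [List.take_take, Nat.min_self]
      have hval := pvBRow_take_succ e coal prev false j hjc
      rw [← hfull] at hval
      set v := ((coal.getD j 0 == e) && (prev.getD j false || (false || (full.take j).any id))) with hv
      -- branch analysis: both set-branches write the same row; the skip-branch already has it
      have hbool : ((prev.getD j false && (coal.getD j 0 == e))
            || ((full.take j).any id && (coal.getD j 0 == e))) = v := by
        rw [hv]; cases prev.getD j false <;> cases (coal.getD j 0 == e) <;>
          cases (full.take j).any id <;> rfl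
      have hsetrow : ((false :: (full.take j ++ List.replicate (coal.length - j) false)).set (j+1) true)
          = false :: (full.take j ++ true :: pad) := by
        rw [hcurrow]
        show (false :: (full.take j ++ false :: pad)).set (j+1) true = _
        have : (j+1) = (full.take j).length + 1 := by rw [htlen]
        calc (false :: (full.take j ++ false :: pad)).set (j+1) true
            = false :: ((full.take j ++ false :: pad).set (full.take j).length true) := by
              rw [htlen]; rfl
          _ = false :: (full.take j ++ true :: pad) := by rw [pv_set_mid]
      have htarget : (full.take (j+1) ++ pad) = full.take j ++ v :: pad := by
        rw [hval]; simp
      -- now case on the two tested conditions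
      by_cases h1 : (prev.getD j false && (coal.getD j 0 == e)) = true
      · have hvtrue : v = true := by
          have hb := hbool; rw [h1, Bool.true_or] at hb; exact hb.symm
        rw [if_pos h1, List.set_set, hsetrow, htarget, hvtrue]
      · rw [if_neg h1, hscan]
        by_cases h2 : ((full.take j).any id && (coal.getD j 0 == e)) = true
        · have hvtrue : v = true := by
            have hb := hbool; rw [h2, Bool.or_true] at hb; exact hb.symm
          rw [if_pos h2, List.set_set, hsetrow, htarget, hvtrue]
        · have hx : (prev.getD j false && (coal.getD j 0 == e)) = false :=
            Bool.eq_false_iff.mpr h1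
          have hy : ((full.take j).any id && (coal.getD j 0 == e)) = false :=
            Bool.eq_false_iff.mpr h2
          have hvfalse : v = false := by
            have hb := hbool; rw [hx, hy, Bool.or_self] at hb; exact hb.symm
          rw [if_neg h2, htarget, hvfalse, hcurrow]
  have hk := key coal.length (Nat.le_refl _)
  unfold pvA_inner
  rw [hk]
  congr 2
  rw [Nat.sub_self, List.replicate_zero, List.append_nil, List.take_of_length_le (by omega)]

theorem pvRowsB_zero (coal seq : List Int) :
    pvRowsB coal seq 0 = true :: List.replicate coal.length false := rfl

theorem pvRowsB_succ (coal seq : List Int) (k : Nat) (hk : k < seq.length) :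
    pvRowsB coal seq (k+1) = false :: pvBRow (seq.getD k 0) coal (pvRowsB coal seq k) false := by
  unfold pvRowsB
  rw [List.take_succ, List.getElem?_eq_getElem hk, List.getD_eq_getElem seq 0 hk]
  simp only [Option.toList_some, List.foldl_append, List.foldl_cons, List.foldl_nil]

theorem pvTbl_length (coal seq : List Int) : ∀ k, (pvTbl coal seq k).length = seq.length + 1 := by
  intro k
  induction k with
  | zero => simp [pvTbl]
  | succ k ih => simp [pvTbl, ih]

theorem pvTbl_getD (coal seq : List Int) : ∀ k, k ≤ seq.length → ∀ i, i ≤ seq.length →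
    (pvTbl coal seq k).getD i [] =
      if i ≤ k then pvRowsB coal seq i else List.replicate (coal.length+1) false := by
  intro k
  induction k with
  | zero =>
    intro _ i hi
    cases i with
    | zero =>
      rw [if_pos (Nat.le_refl 0)]
      unfold pvTbl
      rw [pv_getD_set_self _ 0 _ [] (by simp)]
      simp [pvRowsB_zero, List.replicate_succ]
    | succ i =>
      rw [if_neg (by omega)]
      unfold pvTbl
      rw [pv_getD_set_ne _ 0 (i+1) _ [] (by omega)]
      have hi1 : i + 1 < seq.length + 1 := by omega
      simp [List.getD, hi1]
  | succ k ih =>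
    intro hk i hi
    have hk' : k ≤ seq.length := by omega
    show ((pvTbl coal seq k).set (k+1) _).getD i [] = _
    by_cases hik : i = k+1
    · subst hik
      rw [pv_getD_set_self _ _ _ [] (by rw [pvTbl_length]; omega)]
      rw [if_pos (Nat.le_refl _), pvRowsB_succ coal seq k (by omega)]
    · rw [pv_getD_set_ne _ _ _ _ [] (fun h => hik h.symm), ih hk' i hi]
      by_cases hik2 : i ≤ k
      · rw [if_pos hik2, if_pos (by omega)]
      · rw [if_neg hik2, if_neg (by omega)]

theorem pv_outer (coal seq : List Int) : ∀ k, k ≤ seq.length →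
    (List.range k).foldl (fun dp s0 => pvA_inner coal seq (s0+1) dp) (pvTbl coal seq 0)
      = pvTbl coal seq k := by
  intro k
  induction k with
  | zero => intro _; rfl
  | succ k ih =>
    intro hk
    have hk' : k ≤ seq.length := by omega
    rw [List.range_succ, List.foldl_append, ih hk']
    simp only [List.foldl_cons, List.foldl_nil]
    rw [pv_inner_spec coal seq (k+1) (pvTbl coal seq k) (by omega)
      (by rw [pvTbl_length]; omega)
      (by rw [pvTbl_getD coal seq k hk' (k+1) hk, if_neg (by omega)])]
    rw [Nat.add_sub_cancel, pvTbl_getD coal seq k hk' k (by omega), if_pos (Nat.le_refl k)]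
    rfl

-- ===== VERDICT (by name: the statement is the Claim_ definition above) =====
theorem solve_haunted_factory_spec : Claim_equal_solve_haunted_factory := by
  intro coal seq _
  unfold Spec_solve_haunted_factory solve_haunted_factory solve_haunted_factory_alt
  simp only []
  have hinit : (List.replicate (seq.length+1) (List.replicate (coal.length+1) false)).set 0
      (((List.replicate (seq.length+1) (List.replicate (coal.length+1) false)).getD 0 []).set 0 true)
      = pvTbl coal seq 0 := by
    unfold pvTbl
    congr 2
  rw [hinit, pv_outer coal seq seq.length (Nat.le_refl _)]
  rw [pvTbl_getD coal seq seq.length (Nat.le_refl _) seq.length (Nat.le_refl _),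
    if_pos (Nat.le_refl _)]
  unfold pvRowsB
  rw [List.take_length]
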